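-- pv_equiv track=rewrite | github.com/alopatindev/data_structures | heap/binary_max_heap.py | arg_min_max
-- ===== SOURCE A (Python) =====
-- def arg_min_max(heap, indexes):
--     result_min = None
--     result_max = None
--     for i in indexes:
--         if i < len(heap):
--             if (result_min is None) or heap[i] < heap[result_min]:
--                 result_min = i
--             if (result_max is None) or heap[i] > heap[result_max]:
--                 result_max = i
--     return result_min, result_max
-- ===== SOURCE B (Python) =====
-- def arg_min_max(heap, indexes):
--     valid = [i for i in indexes if i < len(heap)]
--     if not valid:
--         return None, None
--     asc = sorted(valid, key=lambda i: heap[i])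
--     desc = sorted(valid, key=lambda i: heap[i], reverse=True)
--     return asc[0], desc[0]
-- ===== Notes on version B (the rewrite author's own statement) =====
-- stated objective: alternative
-- what changed: Replaced the fused single-pass accumulator loop with filter-then-stable-sort: sort the valid indexes by heap value ascending and descending and take the head of each, stability giving A's earliest-wins tie-break.
-- outside the precondition, e.g. on arg_min_max([], [-2]): A returns (-2, -2), B raises IndexError
import Mathlib
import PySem

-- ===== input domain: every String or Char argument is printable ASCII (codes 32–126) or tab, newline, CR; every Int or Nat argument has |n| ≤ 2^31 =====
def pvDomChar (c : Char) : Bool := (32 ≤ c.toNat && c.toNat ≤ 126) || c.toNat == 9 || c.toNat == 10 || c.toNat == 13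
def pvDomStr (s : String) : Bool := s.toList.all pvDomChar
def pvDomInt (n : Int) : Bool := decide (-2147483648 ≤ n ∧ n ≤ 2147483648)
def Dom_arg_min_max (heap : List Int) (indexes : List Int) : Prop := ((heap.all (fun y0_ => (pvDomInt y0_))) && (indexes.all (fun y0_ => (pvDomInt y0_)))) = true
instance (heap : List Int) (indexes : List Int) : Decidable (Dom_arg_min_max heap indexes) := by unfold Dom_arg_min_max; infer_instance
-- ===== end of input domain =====

-- B replaces A's fused one-pass accumulator loop by filter-then-stable-sort:
-- sort the valid indexes by heap value ascending and descending and take the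
-- head of each (stability reproduces A's earliest-wins tie-break).

-- ===== PORT A =====
-- heap[i] (exact under Pre_: every index in indexes is ≥ -len(heap))
def pvAt (heap : List Int) (i : Int) : Int := PySem.List.pyGetD heap i 0

def arg_min_max (heap : List Int) (indexes : List Int) : Option Int × Option Int :=
  indexes.foldl (fun (acc : Option Int × Option Int) i =>
    if i < (heap.length : Int) then
      (match acc.1 with
       | none => some i
       | some m => if pvAt heap i < pvAt heap m then some i else some m,
       match acc.2 with
       | none => some i
       | some m => if pvAt heap i > pvAt heap m then some i else some m)
    else acc) (none, none)

-- ===== PORT B =====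
def arg_min_max_alt (heap : List Int) (indexes : List Int) : Option Int × Option Int :=
  let valid := indexes.filter (fun i => i < (heap.length : Int))
  if valid.isEmpty then (none, none)
  else
    let asc := PySem.List.sorted valid (fun i => pvAt heap i)
    let desc := PySem.List.sorted valid (fun i => pvAt heap i) true
    (asc.head?, desc.head?)

-- ===== PRECONDITION & SPEC =====
-- Pre_ excludes inputs containing an index below -len(heap): B raises IndexError
-- there (heap[i] during the sorts); A also raises except in degenerate cases where
-- its short-circuit never reads the heap.
def Pre_arg_min_max (heap : List Int) (indexes : List Int) : Prop :=
  ∀ i ∈ indexes, -(heap.length : Int) ≤ i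
instance (heap : List Int) (indexes : List Int) : Decidable (Pre_arg_min_max heap indexes) := by unfold Pre_arg_min_max; infer_instance

def pvWitness_arg_min_max : List Int × List Int := ([3, 1, 2], [0, 2, 1, -1, 7])

def Spec_arg_min_max (heap : List Int) (indexes : List Int) (out : Option Int × Option Int) : Prop := out = arg_min_max_alt heap indexes
instance (heap : List Int) (indexes : List Int) (out : Option Int × Option Int) : Decidable (Spec_arg_min_max heap indexes out) := by unfold Spec_arg_min_max; infer_instance

-- ===== CLAIM (what is proved, stated in full; the proofs are below) =====
def Claim_equal_arg_min_max : Prop := ∀ (heap : List Int) (indexes : List Int), Dom_arg_min_max heap indexes → Pre_arg_min_max heap indexes → Spec_arg_min_max heap indexes (arg_min_max heap indexes)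

-- ===== LEMMAS AND PROOFS =====

-- A's fused loop splits into two independent filtered folds.
theorem arg_min_max_foldl_split (heap : List Int) (indexes : List Int)
    (mn mx : Option Int) :
    indexes.foldl (fun (acc : Option Int × Option Int) i =>
      if i < (heap.length : Int) then
        (match acc.1 with
         | none => some i
         | some m => if pvAt heap i < pvAt heap m then some i else some m,
         match acc.2 with
         | none => some i
         | some m => if pvAt heap i > pvAt heap m then some i else some m)
      else acc) (mn, mx)
    = ((indexes.filter (fun i => i < (heap.length : Int))).foldl
        (fun acc i => match acc with
          | none => some i
          | some m => if pvAt heap i < pvAt heap m then some i else some m) mn,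
       (indexes.filter (fun i => i < (heap.length : Int))).foldl
        (fun acc i => match acc with
          | none => some i
          | some m => if pvAt heap m < pvAt heap i then some i else some m) mx) := by
  induction indexes generalizing mn mx with
  | nil => rfl
  | cons x xs ih =>
    simp only [List.foldl_cons, List.filter_cons]
    by_cases h : x < (heap.length : Int)
    · simp only [h, if_pos, decide_true]
      rw [ih]
      simp [gt_iff_lt, List.foldl_cons]
    · simp only [h, if_neg, decide_false, not_false_iff]
      rw [ih]
      simp

-- Inserting with insertBy changes the head exactly as the accumulator step does.
theorem head?_insertBy (b : Int → Int → Bool) (x : Int) (ys : List Int) :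
    (PySem.List.insertBy b x ys).head?
      = some (match ys with
              | [] => x
              | y :: _ => if b x y then x else y) := by
  cases ys with
  | nil => rfl
  | cons y t =>
    simp only [PySem.List.insertBy]
    by_cases h : b x y = true <;> simp [h]

-- The head of an insertBy fold is the first-extremal accumulator fold.
theorem head?_foldl_insertBy (b : Int → Int → Bool) (l acc : List Int) :
    (l.foldl (fun acc x => PySem.List.insertBy b x acc) acc).head?
      = l.foldl (fun o x => match o with
          | none => some x
          | some m => if b x m then some x else some m) acc.head? := by
  induction l generalizing acc with
  | nil => rfl
  | cons x xs ih =>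
    simp only [List.foldl_cons]
    rw [ih, head?_insertBy]
    cases acc with
    | nil => rfl
    | cons y t => simp only [List.head?_cons]; by_cases hb : b x y = true <;> simp [hb]

theorem arg_min_max_eq (heap : List Int) (indexes : List Int) :
    arg_min_max heap indexes = arg_min_max_alt heap indexes := by
  unfold arg_min_max arg_min_max_alt
  rw [arg_min_max_foldl_split]
  by_cases h : (indexes.filter (fun i => i < (heap.length : Int))).isEmpty
  · rw [List.isEmpty_iff] at h
    simp [h]
  · simp only [h, if_neg, Bool.not_eq_true]
    rw [PySem.List.sorted_eq_foldl_insertBy, PySem.List.sorted_rev_eq_foldl_insertBy]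
    rw [head?_foldl_insertBy, head?_foldl_insertBy]
    refine Prod.ext ?_ ?_ <;> simp only [List.head?_nil] <;>
    · congr 1
      funext o x; cases o <;> simp

-- ===== VERDICT (by name: the statement is the Claim_ definition above) =====
theorem arg_min_max_spec : Claim_equal_arg_min_max := by
  intro heap indexes _ _
  unfold Spec_arg_min_max
  exact arg_min_max_eq heap indexes
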